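-- pv_equiv track=rewrite | github.com/Juliox14/Metodos_numericos | gauss_jordan.py | verificarInconsistencia
-- ===== SOURCE A (Python) =====
-- def verificarInconsistencia(matriz):
--     filas = len(matriz)
--     columnas = len(matriz[0])
--     for i in range(filas):
--         if all(matriz[i][j] == 0 for j in range(columnas - 1)) and matriz[i][columnas - 1] != 0:
--             return True
--     for i in range(filas):
--         for k in range(i + 1, filas):
--             if matriz[i][:columnas - 1] == matriz[k][:columnas - 1] and matriz[i][columnas - 1] != matriz[k][columnas - 1]:
--                 return True
--     return False
-- ===== SOURCE B (Python) =====
-- def verificarInconsistencia(matriz):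
--     columnas = len(matriz[0])
--     vistos = {}
--     for fila in matriz:
--         coef = tuple(fila[:columnas - 1])
--         const = fila[columnas - 1]
--         if const != 0 and not any(coef):
--             return True
--         if coef in vistos:
--             if vistos[coef] != const:
--                 return True
--         else:
--             vistos[coef] = const
--     return False
-- ===== Notes on version B (the rewrite author's own statement) =====
-- stated objective: faster
-- what changed: Replaced A's quadratic all-pairs row comparison by a single pass that hashes each row's coefficient tuple to its constant in a dict and reports a conflicting constant (or an all-zero coefficient row with nonzero constant) on the fly.
-- outside the precondition, e.g. on verificarInconsistencia([[0, 0], [3]]): A returns False, B raises IndexError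
import Mathlib
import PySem

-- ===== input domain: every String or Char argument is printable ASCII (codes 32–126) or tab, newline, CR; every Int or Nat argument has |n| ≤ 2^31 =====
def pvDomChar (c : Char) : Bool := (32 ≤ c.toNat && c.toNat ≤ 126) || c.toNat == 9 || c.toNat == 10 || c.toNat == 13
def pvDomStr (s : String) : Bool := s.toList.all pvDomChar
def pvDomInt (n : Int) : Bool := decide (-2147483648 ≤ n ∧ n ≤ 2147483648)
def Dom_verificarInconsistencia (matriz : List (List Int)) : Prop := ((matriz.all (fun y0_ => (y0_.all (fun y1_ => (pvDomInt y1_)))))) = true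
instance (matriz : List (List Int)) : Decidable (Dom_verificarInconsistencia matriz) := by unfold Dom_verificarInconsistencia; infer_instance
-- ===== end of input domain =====

-- B replaces A's quadratic all-pairs row scan by one pass that maps each coefficient tuple
-- to its first constant in a dict and flags a conflict on the fly (objective: faster).


-- ===== PORT A =====
-- Literal port of A: first loop looks for an all-zero-coefficient row with a nonzero constant,
-- second (quadratic) loop compares every pair of rows. pyGetD is exact under Pre_ (indices in range).
def verificarInconsistencia (matriz : List (List Int)) : Bool :=
  let filas : Int := PySem.List.len matriz
  let columnas : Int := PySem.List.len (PySem.List.pyGetD matriz 0 [])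
  ((PySem.List.pyRange 0 filas 1).any (fun i =>
      ((PySem.List.pyRange 0 (columnas - 1) 1).all (fun j =>
          PySem.List.pyGetD (PySem.List.pyGetD matriz i []) j 0 == 0))
        && (PySem.List.pyGetD (PySem.List.pyGetD matriz i []) (columnas - 1) 0 != 0)))
  || ((PySem.List.pyRange 0 filas 1).any (fun i =>
      (PySem.List.pyRange (i + 1) filas 1).any (fun k =>
        (PySem.List.slice (PySem.List.pyGetD matriz i []) none (some (columnas - 1))
            == PySem.List.slice (PySem.List.pyGetD matriz k []) none (some (columnas - 1)))
          && (PySem.List.pyGetD (PySem.List.pyGetD matriz i []) (columnas - 1) 0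
                != PySem.List.pyGetD (PySem.List.pyGetD matriz k []) (columnas - 1) 0))))

-- ===== PORT B =====
-- The loop of Source B: walk the rows once, keeping the dict 'vistos' from coefficient tuple to the
-- constant of the first row that carried it; report a conflict (or a degenerate row) on sight.
def pvAltLoop (columnas : Int) (vistos : PySem.Dict (List Int) Int) :
    List (List Int) → Bool
  | [] => false
  | fila :: rest =>
    let coef := PySem.List.slice fila none (some (columnas - 1))
    let konst := PySem.List.pyGetD fila (columnas - 1) 0
    if (konst != 0) && !(coef.any (fun x => x != 0)) then true
    else
      match vistos.get? coef with
      | some c => if c != konst then true else pvAltLoop columnas vistos rest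
      | none => pvAltLoop columnas (vistos.insert coef konst) rest

def verificarInconsistencia_alt (matriz : List (List Int)) : Bool :=
  let columnas : Int := PySem.List.len (PySem.List.pyGetD matriz 0 [])
  pvAltLoop columnas PySem.Dict.empty matriz

-- ===== PRECONDITION & SPEC =====
-- Pre_ restricts to the task's natural domain: a nonempty augmented matrix whose first row is
-- nonempty and whose rows all reach the first row's width (the column count A reads). Outside it
-- both programs may hit an IndexError on a too-short row (A also on the empty matrix), and where
-- A happens to return early before reaching such a row its value is an accident of row order.
def Pre_verificarInconsistencia (matriz : List (List Int)) : Prop :=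
  matriz ≠ [] ∧ 0 < (matriz.headD []).length ∧
    ∀ fila ∈ matriz, (matriz.headD []).length ≤ fila.length
instance (matriz : List (List Int)) : Decidable (Pre_verificarInconsistencia matriz) := by
  unfold Pre_verificarInconsistencia; infer_instance

def pvWitness_verificarInconsistencia : List (List Int) := [[1, 0, 2], [0, 1, 3], [1, 0, 5]]

def Spec_verificarInconsistencia (matriz : List (List Int)) (out : Bool) : Prop := out = verificarInconsistencia_alt matriz
instance (matriz : List (List Int)) (out : Bool) : Decidable (Spec_verificarInconsistencia matriz out) := by unfold Spec_verificarInconsistencia; infer_instance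

-- ===== CLAIM (what is proved, stated in full; the proofs are below) =====
def Claim_equal_verificarInconsistencia : Prop := ∀ (matriz : List (List Int)), Dom_verificarInconsistencia matriz → Pre_verificarInconsistencia matriz → Spec_verificarInconsistencia matriz (verificarInconsistencia matriz)

-- ===== LEMMAS AND PROOFS =====

-- Reference vocabulary: coefficient part, constant part, the two row tests.
def pvCoef (c : Nat) (r : List Int) : List Int := r.take (c - 1)
def pvConst (c : Nat) (r : List Int) : Int := r.getD (c - 1) 0
def pvZ (c : Nat) (r : List Int) : Bool := (pvConst c r != 0) && !((pvCoef c r).any (fun x => x != 0))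
def pvPair (c : Nat) (r q : List Int) : Bool := (pvCoef c r == pvCoef c q) && (pvConst c r != pvConst c q)

-- "some later row conflicts with an earlier one", structurally
def pvAnyPairs (t : List Int → List Int → Bool) : List (List Int) → Bool
  | [] => false
  | r :: s => s.any (t r) || pvAnyPairs t s

-- interleaved single-pass reference
def pvSpec (c : Nat) : List (List Int) → Bool
  | [] => false
  | r :: s => pvZ c r || s.any (pvPair c r) || pvSpec c s

-- dict-lookup test used by the invariant for B's loop
def pvHit (c : Nat) (d : PySem.Dict (List Int) Int) (q : List Int) : Bool :=
  match d.get? (pvCoef c q) with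
  | some k => k != pvConst c q
  | none => false

theorem pvSpec_split (c : Nat) (l : List (List Int)) :
    pvSpec c l = (l.any (pvZ c) || pvAnyPairs (pvPair c) l) := by
  induction l with
  | nil => rfl
  | cons r s ih =>
    simp only [pvSpec, pvAnyPairs, List.any_cons, ih]
    cases pvZ c r <;> cases s.any (pvPair c r) <;> simp

-- (range m).all over getD is .take m |>.all, for m within the list
theorem pvRangeAllGetD (m : Nat) (l : List Int) (f : Int → Bool) (hm : m ≤ l.length) :
    (List.range m).all (fun j => f (l.getD j 0)) = (l.take m).all f := by
  induction l generalizing m with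
  | nil =>
    simp only [List.length_nil, Nat.le_zero] at hm
    subst hm; simp
  | cons a l ih =>
    cases m with
    | zero => simp
    | succ m =>
      rw [List.range_succ_eq_map]
      simp only [List.all_cons, List.all_map, List.take_succ_cons, List.getD_cons_zero]
      congr 1
      exact ih m (by simpa using hm)

-- the index-pair loop is the structural pair scan
theorem pvRangePairs (t : List Int → List Int → Bool) (l : List (List Int)) :
    (List.range l.length).any (fun i => (l.drop (i + 1)).any (t (l.getD i []))) =
      pvAnyPairs t l := by
  induction l with
  | nil => rfl
  | cons r s ih =>
    rw [List.length_cons, List.range_succ_eq_map]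
    simp only [List.any_cons, List.any_map, pvAnyPairs]
    congr 1

-- A's zero-row test equals pvZ on a row of the right length
theorem pvRowZ (c : Nat) (hc : 0 < c) (fila : List Int) (hlen : c ≤ fila.length) :
    (((PySem.List.pyRange 0 ((c : Int) - 1) 1).all (fun j => PySem.List.pyGetD fila j 0 == 0))
        && (PySem.List.pyGetD fila ((c : Int) - 1) 0 != 0)) = pvZ c fila := by
  have hcast : (c : Int) - 1 = ((c - 1 : Nat) : Int) := by omega
  rw [hcast, PySem.List.pyRange_zero_nat, PySem.List.pyGetD_natCast]
  simp only [List.all_map, Function.comp_def, PySem.List.pyGetD_natCast]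
  have : ((List.range (c - 1)).all fun j => fila.getD j 0 == 0) = (fila.take (c - 1)).all (fun x => x == 0) := by
    have := pvRangeAllGetD (c - 1) fila (fun x => x == 0) (by omega)
    simpa using this
  rw [this, List.all_eq_not_any_not, pvZ, pvCoef, pvConst, Bool.and_comm]
  rfl

-- A's pair test equals pvPair (no length hypotheses needed)
theorem pvRowPair (c : Nat) (hc : 0 < c) (r q : List Int) :
    ((PySem.List.slice r none (some ((c : Int) - 1)) == PySem.List.slice q none (some ((c : Int) - 1)))
        && (PySem.List.pyGetD r ((c : Int) - 1) 0 != PySem.List.pyGetD q ((c : Int) - 1) 0))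
      = pvPair c r q := by
  have hcast : (c : Int) - 1 = ((c - 1 : Nat) : Int) := by omega
  rw [hcast, PySem.List.slice_to_natCast, PySem.List.slice_to_natCast,
    PySem.List.pyGetD_natCast, PySem.List.pyGetD_natCast]
  rfl

-- 'for i in range(len(l)): … l[i] …' as a structural any
theorem pvAnyIndex {α : Type} (l : List α) (d : α) (f : α → Bool) :
    (PySem.List.pyRange 0 (PySem.List.len l) 1).any (fun i => f (PySem.List.pyGetD l i d))
      = l.any f := by
  conv_rhs => rw [← PySem.List.map_pyGetD_pyRange_zero l d]
  rw [List.any_map]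
  simp [Function.comp_def]

theorem pvAnyIndexFrom {α : Type} (l : List α) (d : α) (a : Int) (ha : 0 ≤ a) (f : α → Bool) :
    (PySem.List.pyRange a (PySem.List.len l) 1).any (fun i => f (PySem.List.pyGetD l i d))
      = (l.drop a.toNat).any f := by
  conv_rhs => rw [← PySem.List.map_pyGetD_pyRange l d ha]
  rw [List.any_map]
  simp [Function.comp_def]

-- A computes "some degenerate row, or some conflicting pair"
theorem pvA_eq (matriz : List (List Int)) (h1 : matriz ≠ [])
    (hc : 0 < (matriz.headD []).length)
    (hl : ∀ fila ∈ matriz, (matriz.headD []).length ≤ fila.length) :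
    verificarInconsistencia matriz =
      (matriz.any (pvZ (matriz.headD []).length)
        || pvAnyPairs (pvPair (matriz.headD []).length) matriz) := by
  set c : Nat := (matriz.headD []).length with hcdef
  have hcol : PySem.List.len (PySem.List.pyGetD matriz 0 []) = (c : Int) := by
    obtain ⟨h, t, rfl⟩ : ∃ h t, matriz = h :: t := by
      cases matriz with
      | nil => exact absurd rfl h1
      | cons h t => exact ⟨h, t, rfl⟩
    simp [PySem.List.pyGetD_zero_cons, PySem.List.len_eq, hcdef]
  rw [verificarInconsistencia]
  simp only [hcol]
  congr 1
  · -- first loop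
    rw [pvAnyIndex matriz [] (fun fila =>
      ((PySem.List.pyRange 0 ((c:Int) - 1) 1).all (fun j => PySem.List.pyGetD fila j 0 == 0))
        && (PySem.List.pyGetD fila ((c:Int) - 1) 0 != 0))]
    apply PySem.List.any_congr_mem
    intro fila hf
    exact pvRowZ c hc fila (hl fila hf)
  · -- second loop
    have step1 : ∀ i ∈ PySem.List.pyRange 0 (PySem.List.len matriz) 1,
        ((PySem.List.pyRange (i + 1) (PySem.List.len matriz) 1).any (fun k =>
          (PySem.List.slice (PySem.List.pyGetD matriz i []) none (some ((c:Int) - 1))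
              == PySem.List.slice (PySem.List.pyGetD matriz k []) none (some ((c:Int) - 1)))
            && (PySem.List.pyGetD (PySem.List.pyGetD matriz i []) ((c:Int) - 1) 0
                  != PySem.List.pyGetD (PySem.List.pyGetD matriz k []) ((c:Int) - 1) 0)))
        = ((matriz.drop (i + 1).toNat).any (pvPair c (PySem.List.pyGetD matriz i []))) := by
      intro i hi
      have h0 : (0:Int) ≤ i + 1 := by
        have := (PySem.List.mem_pyRange_one.mp hi).1
        omega
      rw [PySem.List.any_congr_mem (g := fun k =>
          pvPair c (PySem.List.pyGetD matriz i []) (PySem.List.pyGetD matriz k []))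
        (fun k _ => pvRowPair c hc (PySem.List.pyGetD matriz i []) (PySem.List.pyGetD matriz k []))]
      exact pvAnyIndexFrom matriz [] (i + 1) h0 (pvPair c (PySem.List.pyGetD matriz i []))
    rw [PySem.List.any_congr_mem step1]
    rw [show PySem.List.len matriz = ((matriz.length : Nat) : Int) from PySem.List.len_eq matriz]
    rw [PySem.List.pyRange_zero_nat, List.any_map]
    rw [← pvRangePairs (pvPair c) matriz]
    apply PySem.List.any_congr_mem
    intro i _
    simp only [Function.comp_def]
    have h1' : ((i : Int) + 1).toNat = i + 1 := by omega
    rw [h1', PySem.List.pyGetD_natCast]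

-- B's slice and index are take and getD once the column count is cast
theorem pvCoefConst (c : Nat) (hc : 0 < c) (fila : List Int) :
    PySem.List.slice fila none (some ((c : Int) - 1)) = pvCoef c fila ∧
      PySem.List.pyGetD fila ((c : Int) - 1) 0 = pvConst c fila := by
  have hcast : (c : Int) - 1 = ((c - 1 : Nat) : Int) := by omega
  rw [hcast, PySem.List.slice_to_natCast, PySem.List.pyGetD_natCast]
  exact ⟨rfl, rfl⟩

-- inserting a fresh key refines the dict test by exactly the pair test against that row
theorem pvHit_insert (c : Nat) (d : PySem.Dict (List Int) Int) (r q : List Int)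
    (h : d.get? (pvCoef c r) = none) :
    pvHit c (d.insert (pvCoef c r) (pvConst c r)) q = (pvHit c d q || pvPair c r q) := by
  by_cases hq : pvCoef c q = pvCoef c r
  · rw [pvHit, hq, PySem.Dict.get?_insert_self]
    rw [pvHit, hq, h, pvPair, hq]
    simp
  · rw [pvHit, PySem.Dict.get?_insert, if_neg hq, pvPair]
    have : (pvCoef c r == pvCoef c q) = false := by
      simp only [beq_eq_false_iff_ne, ne_eq]
      exact fun hh => hq hh.symm
    rw [this, Bool.false_and, Bool.or_false, pvHit]

-- invariant of B's single pass: the dict stands for the rows already consumed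
theorem pvAltLoop_inv (c : Nat) (hc : 0 < c) (l : List (List Int))
    (d : PySem.Dict (List Int) Int) :
    pvAltLoop (c : Int) d l = (l.any (pvHit c d) || pvSpec c l) := by
  induction l generalizing d with
  | nil => simp [pvAltLoop, pvSpec]
  | cons r t ih =>
    rw [pvAltLoop]
    simp only [(pvCoefConst c hc r).1, (pvCoefConst c hc r).2]
    rw [List.any_cons, pvSpec]
    by_cases hz : ((pvConst c r != 0) && !((pvCoef c r).any (fun x => x != 0))) = true
    · rw [if_pos hz]
      have hzz : pvZ c r = true := hz
      simp [hzz]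
    · rw [if_neg hz]
      have hzr : pvZ c r = false := by rwa [pvZ, ← Bool.not_eq_true]
      rcases hget : d.get? (pvCoef c r) with _ | k
      · -- key absent: the loop inserts
        change pvAltLoop (c : Int) (d.insert (pvCoef c r) (pvConst c r)) t = _
        rw [ih]
        have hr : pvHit c d r = false := by rw [pvHit, hget]
        rw [hzr, hr]
        have hsplit : t.any (pvHit c (d.insert (pvCoef c r) (pvConst c r)))
            = (t.any (pvHit c d) || t.any (pvPair c r)) := by
          rw [Bool.eq_iff_iff]
          simp only [List.any_eq_true, Bool.or_eq_true]
          constructor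
          · rintro ⟨q, hq, hh⟩
            rw [pvHit_insert c d r q hget] at hh
            rcases Bool.or_eq_true_iff.mp hh with h' | h'
            · exact Or.inl ⟨q, hq, h'⟩
            · exact Or.inr ⟨q, hq, h'⟩
          · rintro (⟨q, hq, hh⟩ | ⟨q, hq, hh⟩)
            · refine ⟨q, hq, ?_⟩
              rw [pvHit_insert c d r q hget, hh]
              simp
            · refine ⟨q, hq, ?_⟩
              rw [pvHit_insert c d r q hget, hh]
              simp
        rw [hsplit]
        cases t.any (pvHit c d) <;> cases t.any (pvPair c r) <;> cases pvSpec c t <;> simp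
      · -- key present
        change (if (k != pvConst c r) = true then true else pvAltLoop (c : Int) d t) = _
        have hr : pvHit c d r = (k != pvConst c r) := by rw [pvHit, hget]
        by_cases hk : (k != pvConst c r) = true
        · rw [if_pos hk, hr, hk]
          simp
        · have hkk : k = pvConst c r := by simpa using hk
          rw [if_neg hk, ih, hr, hzr]
          have habs : t.any (pvPair c r) = true → t.any (pvHit c d) = true := by
            simp only [List.any_eq_true]
            rintro ⟨q, hq, hp⟩
            refine ⟨q, hq, ?_⟩
            rw [pvPair, Bool.and_eq_true, beq_iff_eq] at hp
            rw [pvHit, ← hp.1, hget, hkk]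
            exact hp.2
          rw [Bool.eq_iff_iff]
          simp only [Bool.or_eq_true]
          tauto

theorem pvB_eq (matriz : List (List Int)) (h1 : matriz ≠ [])
    (hc : 0 < (matriz.headD []).length) :
    verificarInconsistencia_alt matriz = pvSpec (matriz.headD []).length matriz := by
  set c : Nat := (matriz.headD []).length with hcdef
  have hcol : PySem.List.len (PySem.List.pyGetD matriz 0 []) = (c : Int) := by
    obtain ⟨h, t, rfl⟩ : ∃ h t, matriz = h :: t := by
      cases matriz with
      | nil => exact absurd rfl h1
      | cons h t => exact ⟨h, t, rfl⟩
    simp [PySem.List.pyGetD_zero_cons, PySem.List.len_eq, hcdef]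
  rw [verificarInconsistencia_alt]
  simp only [hcol]
  rw [pvAltLoop_inv c hc matriz PySem.Dict.empty]
  have : matriz.any (pvHit c PySem.Dict.empty) = false := by
    simp [List.any_eq_false, pvHit, PySem.Dict.get?_empty]
  rw [this, Bool.false_or]

-- ===== VERDICT (by name: the statement is the Claim_ definition above) =====
theorem verificarInconsistencia_spec : Claim_equal_verificarInconsistencia := by
  intro matriz _ hpre
  obtain ⟨h1, hc, hl⟩ := hpre
  unfold Spec_verificarInconsistencia
  rw [pvA_eq matriz h1 hc hl, pvB_eq matriz h1 hc, pvSpec_split]
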